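-- pv_equiv track=rewrite | github.com/bryannalfaro/Compiladores | visitor3add.py | getNewtype
-- ===== SOURCE A (Python) =====
-- def getNewtype(new):
--     indexOfNew = new.index('new')
--     newType = ''
--     i = indexOfNew + 3
--     new = new[i:]
--     i = 0
--     while i<len(new) and new[i] != ' ' and new[i] != ')' :
--         newType += new[i]
--         i += 1
--     return newType
-- ===== SOURCE B (Python) =====
-- def getNewtype(new):
--     rest = new[new.index('new') + 3:]
--     sp = rest.find(' ')
--     rp = rest.find(')')
--     end = min(sp if sp != -1 else len(rest), rp if rp != -1 else len(rest))
--     return rest[:end]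
-- ===== Notes on version B (the rewrite author's own statement) =====
-- stated objective: simpler
-- what changed: The char-by-char accumulation while loop is replaced by locating the first delimiter with two find calls (mapping -1 to the string length), taking their minimum, and returning a single slice.
import Mathlib
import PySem

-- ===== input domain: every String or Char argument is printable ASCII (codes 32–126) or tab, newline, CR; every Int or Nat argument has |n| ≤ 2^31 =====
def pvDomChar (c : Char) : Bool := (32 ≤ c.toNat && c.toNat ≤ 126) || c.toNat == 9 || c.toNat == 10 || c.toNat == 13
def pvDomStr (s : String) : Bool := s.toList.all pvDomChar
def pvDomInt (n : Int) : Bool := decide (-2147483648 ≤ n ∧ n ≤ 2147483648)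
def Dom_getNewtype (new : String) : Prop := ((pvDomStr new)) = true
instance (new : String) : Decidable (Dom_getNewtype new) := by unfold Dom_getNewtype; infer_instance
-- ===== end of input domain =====

-- B replaces A's char-by-char accumulation loop by two delimiter finds, a min, and one slice (objective: simpler).

-- ===== PORT A =====
-- while i<len(new) and new[i] != ' ' and new[i] != ')': newType += new[i]; i += 1
def pvLoopA : List Char → List Char
  | [] => []
  | c :: cs => if c ≠ ' ' ∧ c ≠ ')' then c :: pvLoopA cs else []

def getNewtype (new : String) : String :=
  let indexOfNew := PySem.Str.find new "new"      -- Pre_ guarantees 'new' occurs, so index = find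
  let rest := PySem.Str.slice new (some (indexOfNew + 3)) none
  String.ofList (pvLoopA rest.toList)

-- ===== PORT B =====
def getNewtype_alt (new : String) : String :=
  let rest := PySem.Str.slice new (some (PySem.Str.find new "new" + 3)) none
  let sp := PySem.Str.find rest " "
  let rp := PySem.Str.find rest ")"
  let e := min (if sp ≠ -1 then sp else PySem.Str.len rest)
               (if rp ≠ -1 then rp else PySem.Str.len rest)
  PySem.Str.slice rest none (some e)

-- ===== PRECONDITION & SPEC =====
-- Pre_ excludes exactly the strings not containing 'new', on which A's new.index('new') raises ValueError.
def Pre_getNewtype (new : String) : Prop := PySem.Str.isIn "new" new = true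
instance (new : String) : Decidable (Pre_getNewtype new) := by unfold Pre_getNewtype; infer_instance

def pvWitness_getNewtype : String := "x = new Cat()"

def Spec_getNewtype (new : String) (out : String) : Prop := out = getNewtype_alt new
instance (new : String) (out : String) : Decidable (Spec_getNewtype new out) := by unfold Spec_getNewtype; infer_instance

-- ===== CLAIM (what is proved, stated in full; the proofs are below) =====
def Claim_equal_getNewtype : Prop := ∀ (new : String), Dom_getNewtype new → Pre_getNewtype new → Spec_getNewtype new (getNewtype new)

-- ===== LEMMAS AND PROOFS =====

-- a singleton is a prefix of l.drop i iff l has x at index i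
lemma pvPrefix_singleton (x : Char) (l : List Char) (i : Nat) :
    [x] <+: l.drop i ↔ l[i]? = some x := by
  have hh : (List.drop i l)[0]? = l[i]? := by simp [List.getElem?_drop]
  cases h : List.drop i l with
  | nil => rw [← hh, h]; simp
  | cons c cs =>
    rw [← hh, h]
    simp only [List.getElem?_cons_zero, List.cons_prefix_cons, Option.some.injEq]
    constructor
    · rintro ⟨hx, -⟩; exact hx.symm
    · intro hx; exact ⟨hx.symm, List.nil_prefix⟩

-- A's loop takes exactly the prefix up to the first delimiter position n
lemma pvLoopA_eq_take (l : List Char) (n : Nat)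
    (h1 : ∀ i (hi : i < l.length), i < n → ¬(l[i] = ' ' ∨ l[i] = ')'))
    (h2 : ∀ (hn : n < l.length), l[n] = ' ' ∨ l[n] = ')') :
    pvLoopA l = l.take n := by
  induction l generalizing n with
  | nil => simp [pvLoopA]
  | cons c cs ih =>
    cases n with
    | zero =>
      have := h2 (by simp)
      simp only [List.getElem_cons_zero] at this
      simp [pvLoopA]
      rcases this with h | h <;> simp [h]
    | succ m =>
      have hc := h1 0 (by simp) (Nat.succ_pos m)
      simp only [List.getElem_cons_zero] at hc
      push_neg at hc
      simp only [pvLoopA, List.take_succ_cons, if_pos hc, List.cons.injEq, true_and]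
      exact ih m
        (fun i hi him => by
          have := h1 (i+1) (by simpa using Nat.succ_lt_succ hi) (Nat.succ_lt_succ him)
          simpa using this)
        (fun hm => by
          have := h2 (by simpa using Nat.succ_lt_succ hm)
          simpa using this)

-- the core identity, on the character list of the sliced string
lemma pvCore (l : List Char) :
    pvLoopA l =
      List.take (min (if PySem.Chars.find l [' '] ≠ -1 then PySem.Chars.find l [' '] else (l.length : Int))
                     (if PySem.Chars.find l [')'] ≠ -1 then PySem.Chars.find l [')'] else (l.length : Int))).toNat l := by
  set fs := PySem.Chars.find l [' '] with hfs
  set fr := PySem.Chars.find l [')'] with hfr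
  have hfs1 := PySem.Chars.neg_one_le_find l [' ']
  have hfr1 := PySem.Chars.neg_one_le_find l [')']
  set a : Int := if fs ≠ -1 then fs else (l.length : Int) with ha
  set b : Int := if fr ≠ -1 then fr else (l.length : Int) with hb
  -- no delimiter strictly before a / b
  have noSp : ∀ i (hi : i < l.length), (i : Int) < a → l[i] ≠ ' ' := by
    intro i hi hia heq
    have hmem : [' '] <+: l.drop i := (pvPrefix_singleton ' ' l i).2 (by simp [List.getElem?_eq_getElem hi, heq])
    by_cases h : fs = -1
    · exact (PySem.Chars.find_eq_neg_one_iff l [' ']).1 h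
        (hmem.isInfix.trans (List.drop_suffix i l).isInfix)
    · have hpos : 0 ≤ fs := by omega
      exact (PySem.Chars.find_spec (s := l) (sub := [' ']) hpos).2 i
        (by simp only [ha, if_pos h] at hia; omega) hmem
  have noRp : ∀ i (hi : i < l.length), (i : Int) < b → l[i] ≠ ')' := by
    intro i hi hib heq
    have hmem : [')'] <+: l.drop i := (pvPrefix_singleton ')' l i).2 (by simp [List.getElem?_eq_getElem hi, heq])
    by_cases h : fr = -1
    · exact (PySem.Chars.find_eq_neg_one_iff l [')']).1 h
        (hmem.isInfix.trans (List.drop_suffix i l).isInfix)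
    · have hpos : 0 ≤ fr := by omega
      exact (PySem.Chars.find_spec (s := l) (sub := [')']) hpos).2 i
        (by simp only [hb, if_pos h] at hib; omega) hmem
  have ha0 : 0 ≤ a := by by_cases h : fs = -1 <;> simp [ha, h] <;> omega
  have hb0 : 0 ≤ b := by by_cases h : fr = -1 <;> simp [hb, h] <;> omega
  apply pvLoopA_eq_take
  · intro i hi him
    have hia : (i : Int) < a := by omega
    have hib : (i : Int) < b := by omega
    push_neg
    exact ⟨noSp i hi hia, noRp i hi hib⟩
  · intro hn
    rcases min_choice a b with h | h
    · have hkey : 0 ≤ fs ∧ a = fs := by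
        by_cases hf : fs = -1
        · exfalso
          have hlen : a = (l.length : Int) := by simp [ha, hf]
          omega
        · exact ⟨by omega, by simp [ha, hf]⟩
      obtain ⟨hpos, haeq⟩ := hkey
      have hpref := (PySem.Chars.find_spec (s := l) (sub := [' ']) hpos).1
      have hget : l[fs.toNat]? = some ' ' := (pvPrefix_singleton ' ' l fs.toNat).1 hpref
      have hidx : (min a b).toNat = fs.toNat := by omega
      have hget2 : l[(min a b).toNat]? = some ' ' := by rw [hidx]; exact hget
      rw [List.getElem?_eq_getElem hn] at hget2
      exact Or.inl (Option.some.inj hget2)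
    · have hkey : 0 ≤ fr ∧ b = fr := by
        by_cases hf : fr = -1
        · exfalso
          have hlen : b = (l.length : Int) := by simp [hb, hf]
          omega
        · exact ⟨by omega, by simp [hb, hf]⟩
      obtain ⟨hpos, hbeq⟩ := hkey
      have hpref := (PySem.Chars.find_spec (s := l) (sub := [')']) hpos).1
      have hget : l[fr.toNat]? = some ')' := (pvPrefix_singleton ')' l fr.toNat).1 hpref
      have hidx : (min a b).toNat = fr.toNat := by omega
      have hget2 : l[(min a b).toNat]? = some ')' := by rw [hidx]; exact hget
      rw [List.getElem?_eq_getElem hn] at hget2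
      exact Or.inr (Option.some.inj hget2)

-- ===== VERDICT (by name: the statement is the Claim_ definition above) =====
theorem getNewtype_spec : Claim_equal_getNewtype := by
  intro new _ _
  unfold Spec_getNewtype
  simp only [getNewtype, getNewtype_alt]
  set rest := PySem.Str.slice new (some (PySem.Str.find new "new" + 3)) none with hrest
  set l := rest.toList with hl
  have hfs1 := PySem.Chars.neg_one_le_find l [' ']
  have hfr1 := PySem.Chars.neg_one_le_find l [')']
  have hsp : PySem.Str.find rest " " = PySem.Chars.find l [' '] := by
    rw [PySem.Str.find_eq]; rfl
  have hrp : PySem.Str.find rest ")" = PySem.Chars.find l [')'] := by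
    rw [PySem.Str.find_eq]; rfl
  have hlen : PySem.Str.len rest = (l.length : Int) := PySem.Str.len_eq rest
  rw [hsp, hrp, hlen]
  set e := min (if PySem.Chars.find l [' '] ≠ -1 then PySem.Chars.find l [' '] else (l.length : Int))
               (if PySem.Chars.find l [')'] ≠ -1 then PySem.Chars.find l [')'] else (l.length : Int)) with he
  have he0 : 0 ≤ e := by
    have h1 : 0 ≤ (if PySem.Chars.find l [' '] ≠ -1 then PySem.Chars.find l [' '] else (l.length : Int)) := by
      by_cases h : PySem.Chars.find l [' '] = -1 <;> simp [h] <;> omega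
    have h2 : 0 ≤ (if PySem.Chars.find l [')'] ≠ -1 then PySem.Chars.find l [')'] else (l.length : Int)) := by
      by_cases h : PySem.Chars.find l [')'] = -1 <;> simp [h] <;> omega
    exact le_min h1 h2
  have : PySem.Str.slice rest none (some e) = String.ofList (List.take e.toNat l) := by
    unfold PySem.Str.slice PySem.Chars.slice
    rw [PySem.List.slice_to l he0]
  rw [this, pvCore l]
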